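-- pv_equiv track=rewrite | github.com/xuefzhao/HGSV_SV_integration_pipe | scripts/step1.standardize_vcfs_to_bed.py | stat_list_to_hash
-- ===== SOURCE A (Python) =====
-- def stat_list_to_hash(bashir_stat):
-- 	out={}
-- 	for k1 in bashir_stat.keys():
-- 		for k2 in bashir_stat[k1].keys():
-- 			if not k2 in out.keys():
-- 				out[k2]={}
-- 			for k3 in bashir_stat[k1][k2]:
-- 				if not k3 in out[k2].keys():
-- 					out[k2][k3]=1
-- 				else:
-- 					out[k2][k3]+=1
-- 	return out
-- ===== SOURCE B (Python) =====
-- def stat_list_to_hash(bashir_stat):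
--     # Gather all third-level values per second-level key, then count each
--     # group in a separate pass (list.count over first-occurrence keys).
--     groups = {}
--     for inner in bashir_stat.values():
--         for k2, k3s in inner.items():
--             groups.setdefault(k2, []).extend(k3s)
--     return {k2: {k3: vals.count(k3) for k3 in dict.fromkeys(vals)}
--             for k2, vals in groups.items()}
-- ===== Notes on version B (the rewrite author's own statement) =====
-- stated objective: idiomatic
-- what changed: Replaces inline per-key increment inside the triple nested loop by a two-phase decomposition: first gather all third-level values per second-level key into flat lists (setdefault/extend), then count each group in a separate comprehension pass.
import Mathlib
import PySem

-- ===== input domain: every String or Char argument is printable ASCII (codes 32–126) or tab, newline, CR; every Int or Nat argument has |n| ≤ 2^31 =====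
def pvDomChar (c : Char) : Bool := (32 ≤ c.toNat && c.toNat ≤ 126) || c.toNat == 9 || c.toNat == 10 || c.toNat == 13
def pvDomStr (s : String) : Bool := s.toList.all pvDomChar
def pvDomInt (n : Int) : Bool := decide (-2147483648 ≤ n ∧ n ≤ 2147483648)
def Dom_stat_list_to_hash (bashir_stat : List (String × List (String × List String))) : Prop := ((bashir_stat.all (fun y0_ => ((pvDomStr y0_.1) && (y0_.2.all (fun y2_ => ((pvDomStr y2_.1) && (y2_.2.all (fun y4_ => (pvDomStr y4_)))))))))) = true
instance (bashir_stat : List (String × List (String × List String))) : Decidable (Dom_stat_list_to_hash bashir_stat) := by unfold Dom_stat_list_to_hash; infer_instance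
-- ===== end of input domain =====

-- B gathers all third-level values per second-level key first, then counts each
-- group in a separate pass (objective: a plainer two-phase decomposition).
-- Python dicts are association lists here; both ports iterate the same pair lists.

-- ===== PORT A =====
-- innermost body: if not k3 in out[k2]: out[k2][k3]=1 else: out[k2][k3]+=1
def bump (d : PySem.Dict String Int) (k3 : String) : PySem.Dict String Int :=
  if !d.contains k3 then d.insert k3 1 else d.insert k3 (d.getD k3 0 + 1)

-- A's two inner loops: ensure out[k2] exists, then bump out[k2][k3] for each k3
def statA_step (out : PySem.Dict String (PySem.Dict String Int)) (q : String × List String) :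
    PySem.Dict String (PySem.Dict String Int) :=
  let out1 := if out.contains q.1 then out else out.insert q.1 PySem.Dict.empty
  q.2.foldl (fun o k3 => o.insert q.1 (bump (o.getD q.1 PySem.Dict.empty) k3)) out1

def stat_list_to_hash (bashir_stat : List (String × List (String × List String))) :
    List (String × List (String × Int)) :=
  let out := bashir_stat.foldl (fun o p => p.2.foldl statA_step o) PySem.Dict.empty
  out.items.map (fun p => (p.1, p.2.items))

-- ===== PORT B =====
-- groups.setdefault(k2, []).extend(k3s)
def statB_step (g : PySem.Dict String (List String)) (q : String × List String) :
    PySem.Dict String (List String) :=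
  g.insert q.1 (g.getD q.1 [] ++ q.2)

def stat_list_to_hash_alt (bashir_stat : List (String × List (String × List String))) :
    List (String × List (String × Int)) :=
  let groups := bashir_stat.foldl (fun g p => p.2.foldl statB_step g) PySem.Dict.empty
  -- {k2: {k3: vals.count(k3) for k3 in dict.fromkeys(vals)} for k2, vals in groups...}
  groups.items.map (fun p => (p.1, (PySem.List.dedup p.2).map (fun k3 => (k3, (p.2.count k3 : Int)))))

-- ===== PRECONDITION & SPEC =====
def Spec_stat_list_to_hash (bashir_stat : List (String × List (String × List String))) (out : List (String × List (String × Int))) : Prop := out = stat_list_to_hash_alt bashir_stat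
instance (bashir_stat : List (String × List (String × List String))) (out : List (String × List (String × Int))) : Decidable (Spec_stat_list_to_hash bashir_stat out) := by unfold Spec_stat_list_to_hash; infer_instance

-- ===== CLAIM (what is proved, stated in full; the proofs are below) =====
def Claim_equal_stat_list_to_hash : Prop := ∀ (bashir_stat : List (String × List (String × List String))), Dom_stat_list_to_hash bashir_stat → Spec_stat_list_to_hash bashir_stat (stat_list_to_hash bashir_stat)

-- ===== LEMMAS AND PROOFS =====

-- the simulation map: a group list on B's side corresponds to its counter on A's side
def mapCnt (g : PySem.Dict String (List String)) : PySem.Dict String (PySem.Dict String Int) :=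
  PySem.Dict.mk (g.items.map (fun p => (p.1, PySem.Dict.counter p.2)))

theorem double_foldl_eq_flatMap {α β γ : Type} (l : List (γ × List α)) (f : β → α → β) (init : β) :
    l.foldl (fun s p => p.2.foldl f s) init = (l.flatMap (·.2)).foldl f init := by
  induction l generalizing init with
  | nil => rfl
  | cons x xs ih => simp [List.flatMap_cons, List.foldl_append, ih]

theorem mapCnt_get? (g : PySem.Dict String (List String)) (k : String) :
    (mapCnt g).get? k = (g.get? k).map PySem.Dict.counter := by
  obtain ⟨l⟩ := g
  induction l with
  | nil => rfl
  | cons p rest ih =>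
    obtain ⟨pk, pv⟩ := p
    simp only [mapCnt] at ih ⊢
    simp only [List.map_cons, PySem.Dict.get?_mk_cons]
    by_cases h : (pk == k) = true
    · simp [h]
    · simp [h, ih]

theorem mapCnt_contains (g : PySem.Dict String (List String)) (k : String) :
    (mapCnt g).contains k = g.contains k := by
  simp [PySem.Dict.contains_eq_isSome_get?, mapCnt_get?]

theorem mapCnt_keys (g : PySem.Dict String (List String)) : (mapCnt g).keys = g.keys := by
  simp [mapCnt, PySem.Dict.keys]

theorem mapCnt_insert (g : PySem.Dict String (List String)) (k : String) (v : List String) :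
    mapCnt (g.insert k v) = (mapCnt g).insert k (PySem.Dict.counter v) := by
  apply PySem.Dict.ext
  by_cases h : g.contains k = true
  · rw [mapCnt, PySem.Dict.items_insert_of_contains _ _ h,
      PySem.Dict.items_insert_of_contains _ _ (by rw [mapCnt_contains]; exact h)]
    simp only [mapCnt, List.map_map]
    apply List.map_congr_left
    intro p _
    by_cases hp : p.1 = k <;> simp [hp]
  · rw [mapCnt, PySem.Dict.items_insert_of_not_contains _ _ (by simpa using h),
      PySem.Dict.items_insert_of_not_contains _ _ (by rw [mapCnt_contains]; simpa using h)]
    simp [mapCnt]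

-- inserting the value already present at an existing key is the identity (nodup keys)
theorem insert_self_value {ν : Type} (d : PySem.Dict String ν) (k : String) (v : ν)
    (hnd : d.keys.Nodup) (h : d.get? k = some v) : d.insert k v = d := by
  apply PySem.Dict.ext
  rw [PySem.Dict.items_insert_of_contains _ _ (by rw [PySem.Dict.contains_eq_isSome_get?, h]; rfl)]
  have hc : ∀ p ∈ d.items, (if (p.1 == k) = true then (k, v) else p) = p := by
    intro p hp
    by_cases hpk : (p.1 == k) = true
    · have hk : p.1 = k := by simpa using hpk
      have hv := PySem.Dict.get?_of_mem_items (d := d) (k := k) (v := p.2)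
        (by rw [← hk]; exact hp) hnd
      rw [h] at hv
      have hvp : v = p.2 := Option.some_injective _ hv
      subst hk
      simp [hvp]
    · simp [hpk]
  exact (List.map_congr_left hc).trans (List.map_id _)

-- the Python branches of bump both amount to insert (count + 1)
theorem bump_eq (d : PySem.Dict String Int) (k3 : String) :
    bump d k3 = d.insert k3 (d.getD k3 0 + 1) := by
  unfold bump
  by_cases h : d.contains k3 = true
  · simp [h]
  · have h' : d.contains k3 = false := by simpa using h
    rw [PySem.Dict.getD_of_not_contains _ _ h']
    simp [h']

theorem bump_foldl_counter (l xs : List String) :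
    l.foldl bump (PySem.Dict.counter xs) = PySem.Dict.counter (xs ++ l) := by
  have h1 : ∀ (d : PySem.Dict String Int) (l : List String),
      l.foldl bump d = l.foldl (fun d x => d.insert x (d.getD x 0 + 1)) d := by
    intro d l
    induction l generalizing d with
    | nil => rfl
    | cons x xs ih => simp [List.foldl_cons, bump_eq, ih]
  rw [h1, ← PySem.Dict.foldl_insert_getD_add_one_eq_counter,
    ← PySem.Dict.foldl_insert_getD_add_one_eq_counter, List.foldl_append]

-- hoisting A's repeated read-modify-write of out[k2] out of the k3 loop
theorem hoist (l : List String) (o : PySem.Dict String (PySem.Dict String Int))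
    (k : String) (d : PySem.Dict String Int) (hnd : o.keys.Nodup) (h : o.get? k = some d) :
    l.foldl (fun o k3 => o.insert k (bump (o.getD k PySem.Dict.empty) k3)) o
      = o.insert k (l.foldl bump d) := by
  induction l generalizing o d with
  | nil => exact (insert_self_value o k d hnd h).symm
  | cons x xs ih =>
    simp only [List.foldl_cons]
    rw [PySem.Dict.getD_of_get?_eq_some _ _ h]
    rw [ih (o.insert k (bump d x)) (bump d x) (PySem.Dict.nodup_keys_insert _ _ _ hnd)
      (PySem.Dict.get?_insert_self _ _ _), PySem.Dict.insert_insert_self]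

theorem step_commute (g : PySem.Dict String (List String)) (q : String × List String)
    (hnd : g.keys.Nodup) : statA_step (mapCnt g) q = mapCnt (statB_step g q) := by
  obtain ⟨k, l⟩ := q
  rw [statB_step, mapCnt_insert]
  unfold statA_step
  by_cases h : g.contains k = true
  · obtain ⟨v, hv⟩ : ∃ v, g.get? k = some v := by
      have := PySem.Dict.contains_eq_isSome_get? (d := g) (k := k)
      rw [h] at this
      exact Option.isSome_iff_exists.mp this.symm
    simp only [mapCnt_contains, h, if_true]
    rw [hoist l (mapCnt g) k (PySem.Dict.counter v)
      (by rw [mapCnt_keys]; exact hnd)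
      (by rw [mapCnt_get?, hv]; rfl)]
    rw [bump_foldl_counter, PySem.Dict.getD_of_get?_eq_some _ _ hv]
  · have h' : g.contains k = false := by simpa using h
    simp only [mapCnt_contains, h', Bool.false_eq_true, if_false]
    rw [hoist l ((mapCnt g).insert k PySem.Dict.empty) k PySem.Dict.empty
      (PySem.Dict.nodup_keys_insert _ _ _ (by rw [mapCnt_keys]; exact hnd))
      (PySem.Dict.get?_insert_self _ _ _), PySem.Dict.insert_insert_self]
    rw [PySem.Dict.getD_of_not_contains _ _ h']
    have : PySem.Dict.empty = PySem.Dict.counter ([] : List String) := rfl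
    rw [this, bump_foldl_counter]

theorem main_sim (ps : List (String × List String)) (g : PySem.Dict String (List String))
    (hnd : g.keys.Nodup) :
    ps.foldl statA_step (mapCnt g) = mapCnt (ps.foldl statB_step g) := by
  induction ps generalizing g with
  | nil => rfl
  | cons q qs ih =>
    simp only [List.foldl_cons, step_commute g q hnd]
    exact ih _ (PySem.Dict.nodup_keys_insert _ _ _ hnd)

-- ===== VERDICT (by name: the statement is the Claim_ definition above) =====
theorem stat_list_to_hash_spec : Claim_equal_stat_list_to_hash := by
  intro bashir_stat _
  unfold Spec_stat_list_to_hash stat_list_to_hash stat_list_to_hash_alt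
  rw [double_foldl_eq_flatMap, double_foldl_eq_flatMap]
  have h0 : (PySem.Dict.empty : PySem.Dict String (PySem.Dict String Int)) = mapCnt PySem.Dict.empty := rfl
  rw [h0, main_sim _ _ PySem.Dict.nodup_keys_empty]
  simp only [mapCnt, List.map_map]
  apply List.map_congr_left
  intro p _
  simp [PySem.Dict.items_counter, PySem.List.dedup_eq_ofList]
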